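-- pv_equiv track=rewrite | github.com/willfind/nimble | nimble/core/data/_dataHelpers.py | equalNames
-- ===== SOURCE A (Python) =====
-- def unequalNames(selfNames, otherNames):
--     """Private function to find and return all name inconsistencies
--     between the given two sets. It ignores equality of default
--     values, considering only whether non default names consistent
--     (position by position) and uniquely positioned (if a non default
--     name is present in both, then it is in the same position in
--     both). The return value is a dict between integer IDs and the
--     pair of offending names at that position in both objects.
--
--     Assumptions: the size of the two name sets is equal.
--     """
--     inconsistencies = {}
--
--     def checkFromLeftKeys(ret, leftNames, rightNames):
--         for index, lname in enumerate(leftNames):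
--             rname = rightNames[index]
--             if lname is not None:
--                 if rname is not None:
--                     if lname != rname:
--                         ret[index] = (lname, rname)
--                 else:
--                     ret[index] = (lname, rname)
--
--     # check both name directions
--     checkFromLeftKeys(inconsistencies, selfNames, otherNames)
--     checkFromLeftKeys(inconsistencies, otherNames, selfNames)
--
--     return inconsistencies
--
-- def equalNames(selfNames, otherNames):
--     """
--     Private function to determine equality of either pointNames of
--     featureNames. It ignores equality of default values, considering
--     only whether non default names consistent (position by position)
--     and uniquely positioned (if a non default name is present in
--     both, then it is in the same position in both).
--     """
--     if selfNames is None and otherNames is None: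
--         return True
--     if (selfNames is None
--             and all(n is None for n in otherNames)):
--         return True
--     if (otherNames is None
--             and all(n is None for n in selfNames)):
--         return True
--     if selfNames is None or otherNames is None:
--         return False
--     if len(selfNames) != len(otherNames):
--         return False
--
--     namesUnequal = unequalNames(selfNames, otherNames)
--     return not namesUnequal
-- ===== SOURCE B (Python) =====
-- def equalNames(selfNames, otherNames):
--     if selfNames is None and otherNames is None:
--         return True
--     if (selfNames is None
--             and all(n is None for n in otherNames)):
--         return True
--     if (otherNames is None
--             and all(n is None for n in selfNames)):
--         return True
--     if selfNames is None or otherNames is None: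
--         return False
--     if len(selfNames) != len(otherNames):
--         return False
--     return all(s == o for s, o in zip(selfNames, otherNames))
-- ===== Notes on version B (the rewrite author's own statement) =====
-- stated objective: simpler
-- what changed: Replaces A's two-direction dict-building helper (unequalNames) plus emptiness test with a single short-circuiting positional pass all(s == o for s, o in zip(...)); the symmetric two-pass inconsistency table reduces exactly to element-wise equality.
import Mathlib
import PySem

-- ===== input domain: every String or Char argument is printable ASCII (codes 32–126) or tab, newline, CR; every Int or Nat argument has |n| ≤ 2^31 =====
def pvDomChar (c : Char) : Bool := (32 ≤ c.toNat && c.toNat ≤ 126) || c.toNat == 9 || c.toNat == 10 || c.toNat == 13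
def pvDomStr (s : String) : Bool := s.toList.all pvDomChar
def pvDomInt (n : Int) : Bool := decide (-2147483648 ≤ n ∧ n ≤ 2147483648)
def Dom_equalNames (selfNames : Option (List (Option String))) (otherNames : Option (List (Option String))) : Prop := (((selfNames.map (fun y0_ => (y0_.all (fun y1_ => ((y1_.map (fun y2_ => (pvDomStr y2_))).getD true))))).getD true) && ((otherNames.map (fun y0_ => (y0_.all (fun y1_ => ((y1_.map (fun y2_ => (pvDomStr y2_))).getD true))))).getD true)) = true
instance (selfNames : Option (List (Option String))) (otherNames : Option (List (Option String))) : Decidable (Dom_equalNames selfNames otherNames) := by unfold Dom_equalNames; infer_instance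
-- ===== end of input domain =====

-- B replaces A's two-direction dict-building inconsistency table with one positional
-- equality pass over the zipped name lists (objective: simpler).

-- ===== PORT A =====
-- body of unequalNames' inner helper checkFromLeftKeys, one loop step per enumerated pair
def chkStep (rightNames : List (Option String)) (ret : PySem.Dict Int (Option String × Option String)) (p : Int × Option String) : PySem.Dict Int (Option String × Option String) :=
  let index := p.1
  let lname := p.2
  -- rightNames[index]: both call sites have equal-length lists, so the index is in range
  -- and the `.getD none` default is never taken
  let rname := (PySem.List.pyGet? rightNames index).getD none
  match lname with
  | some _ =>
    match rname with
    | some _ => if lname ≠ rname then ret.insert index (lname, rname) else ret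
    | none => ret.insert index (lname, rname)
  | none => ret

def checkFromLeftKeys (ret : PySem.Dict Int (Option String × Option String)) (leftNames rightNames : List (Option String)) : PySem.Dict Int (Option String × Option String) :=
  (PySem.List.enumerate leftNames).foldl (chkStep rightNames) ret

def unequalNames (selfNames otherNames : List (Option String)) : PySem.Dict Int (Option String × Option String) :=
  let inconsistencies := PySem.Dict.empty
  -- check both name directions
  let inconsistencies := checkFromLeftKeys inconsistencies selfNames otherNames
  let inconsistencies := checkFromLeftKeys inconsistencies otherNames selfNames
  inconsistencies

def equalNames (selfNames : Option (List (Option String))) (otherNames : Option (List (Option String))) : Bool :=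
  match selfNames, otherNames with
  | none, none => true
  | none, some os =>
      if os.all (fun n => n.isNone) then true else false   -- 2nd guard; else the 4th guard returns False
  | some ss, none =>
      if ss.all (fun n => n.isNone) then true else false   -- 3rd guard; else the 4th guard returns False
  | some ss, some os =>
      if ss.length ≠ os.length then false
      else decide ((unequalNames ss os).items = [])        -- `not namesUnequal`

-- ===== PORT B =====
def equalNames_alt (selfNames : Option (List (Option String))) (otherNames : Option (List (Option String))) : Bool :=
  match selfNames, otherNames with
  | none, none => true
  | none, some os => os.all (fun n => n.isNone)
  | some ss, none => ss.all (fun n => n.isNone)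
  | some ss, some os =>
      if ss.length ≠ os.length then false
      else (ss.zip os).all (fun p => p.1 == p.2)

-- ===== PRECONDITION & SPEC =====
def Spec_equalNames (selfNames : Option (List (Option String))) (otherNames : Option (List (Option String))) (out : Bool) : Prop := out = equalNames_alt selfNames otherNames
instance (selfNames : Option (List (Option String))) (otherNames : Option (List (Option String))) (out : Bool) : Decidable (Spec_equalNames selfNames otherNames out) := by unfold Spec_equalNames; infer_instance

-- ===== CLAIM (what is proved, stated in full; the proofs are below) =====
def Claim_equal_equalNames : Prop := ∀ (selfNames : Option (List (Option String))) (otherNames : Option (List (Option String))), Dom_equalNames selfNames otherNames → Spec_equalNames selfNames otherNames (equalNames selfNames otherNames)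

-- ===== LEMMAS AND PROOFS =====

-- a step either keeps the dict or inserts; inserts are never empty
lemma insert_items_ne_nil (d : PySem.Dict Int (Option String × Option String)) (k : Int) (v : Option String × Option String) :
    (d.insert k v).items ≠ [] := by
  rw [PySem.Dict.items_insert]
  split
  · rename_i h
    intro hnil
    rw [List.map_eq_nil_iff] at hnil
    simp [PySem.Dict.contains, hnil] at h
  · simp

def badStep (r : List (Option String)) (p : Int × Option String) : Bool :=
  p.2.isSome && !(p.2 == (PySem.List.pyGet? r p.1).getD none)

lemma chkStep_eq (r : List (Option String)) (d : PySem.Dict Int (Option String × Option String)) (p : Int × Option String) :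
    chkStep r d p = if badStep r p then d.insert p.1 (p.2, (PySem.List.pyGet? r p.1).getD none) else d := by
  unfold chkStep badStep
  rcases p with ⟨i, ln⟩
  cases ln with
  | none => simp
  | some a =>
    cases h : (PySem.List.pyGet? r i).getD none with
    | none => simp [h]
    | some b =>
      simp only [h]
      by_cases hab : a = b <;> simp [hab]

lemma foldl_chk_empty_iff (r : List (Option String)) (L : List (Int × Option String)) (d : PySem.Dict Int (Option String × Option String)) :
    (L.foldl (chkStep r) d).items = [] ↔ d.items = [] ∧ ∀ p ∈ L, badStep r p = false := by
  induction L generalizing d with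
  | nil => simp
  | cons p L ih =>
    simp only [List.foldl_cons, ih, chkStep_eq]
    by_cases hb : badStep r p = true
    · simp only [hb, if_pos]
      constructor
      · rintro ⟨h, -⟩
        exact absurd h (insert_items_ne_nil _ _ _)
      · rintro ⟨-, hall⟩
        exact absurd (hall p (by simp)) (by simp [hb])
    · simp only [if_neg hb]
      rw [Bool.not_eq_true] at hb
      constructor
      · rintro ⟨h, hall⟩
        refine ⟨h, ?_⟩
        intro q hq
        rcases List.mem_cons.mp hq with rfl | hq'
        · exact hb
        · exact hall q hq'
      · rintro ⟨h, hall⟩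
        exact ⟨h, fun q hq => hall q (List.mem_cons_of_mem _ hq)⟩

lemma badStep_eval (r : List (Option String)) (k : Nat) (hk : k < r.length) (x : Option String) :
    badStep r ((0 : Int) + (k : Int), x) = (x.isSome && !(x == r[k])) := by
  unfold badStep
  have h0 : (0 : Int) + (k : Int) = (k : Int) := by ring
  rw [h0, PySem.List.pyGet?_natCast, List.getElem?_eq_getElem hk]
  rfl

lemma band_bnot_beq_false_iff (x y : Option String) :
    (x.isSome && !(x == y)) = false ↔ (x.isSome = true → x = y) := by
  cases x <;> simp

lemma bad_enumerate_iff (l r : List (Option String)) (hlen : l.length = r.length) :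
    (∀ p ∈ PySem.List.enumerate l 0, badStep r p = false) ↔
      ∀ (k : Nat) (h1 : k < l.length) (h2 : k < r.length), l[k].isSome = true → l[k] = r[k] := by
  constructor
  · intro hall k h1 h2
    have hm : ((0 : Int) + (k : Int), l[k]) ∈ PySem.List.enumerate l 0 := by
      rw [PySem.List.mem_enumerate_iff]
      exact ⟨k, h1, rfl⟩
    have := hall _ hm
    rw [badStep_eval r k h2, band_bnot_beq_false_iff] at this
    exact this
  · intro hidx p hp
    rw [PySem.List.mem_enumerate_iff] at hp
    obtain ⟨k, hk, rfl⟩ := hp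
    rw [badStep_eval r k (by omega), band_bnot_beq_false_iff]
    exact hidx k hk (by omega)

lemma pointwise_eq_iff (ss os : List (Option String)) (hlen : ss.length = os.length) :
    ((unequalNames ss os).items = []) ↔
      ∀ (k : Nat) (h1 : k < ss.length) (h2 : k < os.length), ss[k] = os[k] := by
  unfold unequalNames checkFromLeftKeys
  rw [foldl_chk_empty_iff, foldl_chk_empty_iff]
  rw [bad_enumerate_iff ss os hlen, bad_enumerate_iff os ss hlen.symm]
  simp only [PySem.Dict.empty, true_and]
  constructor
  · rintro ⟨hss, hos⟩ k hk1 hk2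
    by_cases hs : ss[k].isSome
    · exact hss k hk1 hk2 hs
    · by_cases ho : os[k].isSome
      · exact (hos k hk2 hk1 ho).symm
      · rw [Option.not_isSome_iff_eq_none] at hs ho
        rw [hs, ho]
  · intro h
    exact ⟨fun k hk1 hk2 _ => h k hk1 hk2, fun k hk1 hk2 _ => (h k hk2 hk1).symm⟩

lemma zip_all_iff (ss os : List (Option String)) (hlen : ss.length = os.length) :
    ((ss.zip os).all (fun p => p.1 == p.2)) = true ↔
      ∀ (k : Nat) (h1 : k < ss.length) (h2 : k < os.length), ss[k] = os[k] := by
  rw [List.all_eq_true]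
  constructor
  · intro hall k h1 h2
    have hk2 : k < (ss.zip os).length := by simp [List.length_zip]; omega
    have := hall (ss.zip os)[k] (List.getElem_mem hk2)
    rwa [List.getElem_zip, beq_iff_eq] at this
  · intro h p hp
    rw [List.mem_iff_getElem] at hp
    obtain ⟨k, hk, rfl⟩ := hp
    have hk1 : k < ss.length := by simp [List.length_zip] at hk; omega
    rw [List.getElem_zip, beq_iff_eq]
    exact h k hk1 (by omega)

-- ===== VERDICT (by name: the statement is the Claim_ definition above) =====
theorem equalNames_spec : Claim_equal_equalNames := by
  intro selfNames otherNames _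
  unfold Spec_equalNames
  rcases selfNames with _ | ss <;> rcases otherNames with _ | os
  · rfl
  · simp only [equalNames, equalNames_alt]
    by_cases h : (os.all fun n => n.isNone) = true <;> simp [h]
  · simp only [equalNames, equalNames_alt]
    by_cases h : (ss.all fun n => n.isNone) = true <;> simp [h]
  · simp only [equalNames, equalNames_alt]
    by_cases hlen : ss.length = os.length
    · rw [if_neg (fun hn => hn hlen), if_neg (fun hn => hn hlen), Bool.eq_iff_iff, decide_eq_true_iff,
        pointwise_eq_iff ss os hlen, zip_all_iff ss os hlen]
    · simp [hlen]
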